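-- pv_equiv track=rewrite | github.com/leontov/os | scripts/resolve_conflicts.py | razobrat_konflikt
-- ===== SOURCE A (Python) =====
-- from typing import Dict, List
--
-- KONFLIKT_START = "<<<<<<<"
--
-- KONFLIKT_DELIM = "======="
--
-- KONFLIKT_END = ">>>>>>>"
--
-- def razobrat_konflikt(lines: List[str]) -> List[str]:
--     """Объединяет конфликтные блоки, оставляя обе версии без маркеров."""
--     rezultat: List[str] = []
--     ours: List[str] = []
--     theirs: List[str] = []
--     sostoyanie = "normal"
--     for stroka in lines:
--         if stroka.startswith(KONFLIKT_START):
--             sostoyanie = "ours"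
--             ours = []
--             theirs = []
--             continue
--         if stroka.startswith(KONFLIKT_DELIM):
--             sostoyanie = "theirs"
--             continue
--         if stroka.startswith(KONFLIKT_END):
--             rezultat.extend(ours)
--             if rezultat and rezultat[-1] != "\n":
--                 rezultat.append("\n")
--             rezultat.extend(theirs)
--             sostoyanie = "normal"
--             continue
--         if sostoyanie == "ours":
--             ours.append(stroka)
--         elif sostoyanie == "theirs":
--             theirs.append(stroka)
--         else:
--             rezultat.append(stroka)
--     return rezultat
-- ===== SOURCE B (Python) =====
-- KONFLIKT_START = "<<<<<<<"
-- KONFLIKT_DELIM = "======="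
-- KONFLIKT_END = ">>>>>>>"
--
--
-- def _is_marker(line):
--     return (line.startswith(KONFLIKT_START)
--             or line.startswith(KONFLIKT_DELIM)
--             or line.startswith(KONFLIKT_END))
--
--
-- def razobrat_konflikt(lines):
--     """Index-driven scan without a state variable: each marker consumes the
--     run of plain lines that follows it."""
--     rezultat = []
--     ours = []
--     theirs = []
--     i = 0
--     n = len(lines)
--     while i < n:
--         line = lines[i]
--         if line.startswith(KONFLIKT_START):
--             i += 1
--             ours = []
--             theirs = []
--             while i < n and not _is_marker(lines[i]):
--                 ours.append(lines[i])
--                 i += 1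
--         elif line.startswith(KONFLIKT_DELIM):
--             i += 1
--             while i < n and not _is_marker(lines[i]):
--                 theirs.append(lines[i])
--                 i += 1
--         elif line.startswith(KONFLIKT_END):
--             rezultat.extend(ours)
--             if rezultat and rezultat[-1] != "\n":
--                 rezultat.append("\n")
--             rezultat.extend(theirs)
--             i += 1
--         else:
--             rezultat.append(line)
--             i += 1
--     return rezultat
-- ===== Notes on version B (the rewrite author's own statement) =====
-- stated objective: alternative
-- what changed: Replaces A's three-way state-variable fold over the lines with a stateless index-driven scan in which each <<<<<<</======= marker branch itself consumes the following run of non-marker lines via an inner loop.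
import Mathlib
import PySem

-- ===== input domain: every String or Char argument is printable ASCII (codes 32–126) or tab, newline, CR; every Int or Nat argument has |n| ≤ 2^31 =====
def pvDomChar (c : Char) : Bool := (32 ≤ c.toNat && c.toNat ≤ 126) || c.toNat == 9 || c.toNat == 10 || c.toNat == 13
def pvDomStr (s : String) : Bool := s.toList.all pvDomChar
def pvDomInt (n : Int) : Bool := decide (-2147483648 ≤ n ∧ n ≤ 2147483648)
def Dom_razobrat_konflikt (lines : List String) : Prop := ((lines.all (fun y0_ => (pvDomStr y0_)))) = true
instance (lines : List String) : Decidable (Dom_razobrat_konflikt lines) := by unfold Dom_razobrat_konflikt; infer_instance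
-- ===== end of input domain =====

-- B replaces A's three-way state variable by an index scan whose marker branches
-- consume the following run of plain lines on the spot (objective: alternative decomposition).

-- ===== PORT A =====
def pvKonfliktStart : String := "<<<<<<<"
def pvKonfliktDelim : String := "======="
def pvKonfliktEnd : String := ">>>>>>>"

def pvStepA : List String × List String × List String × String → String →
    List String × List String × List String × String
  | (rezultat, ours, theirs, sost), stroka =>
    if PySem.Str.startswith stroka pvKonfliktStart then (rezultat, [], [], "ours")
    else if PySem.Str.startswith stroka pvKonfliktDelim then (rezultat, ours, theirs, "theirs")
    else if PySem.Str.startswith stroka pvKonfliktEnd then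
      let r1 := rezultat ++ ours
      let r2 := if r1 ≠ [] ∧ r1.getLast? ≠ some "\n" then r1 ++ ["\n"] else r1
      (r2 ++ theirs, ours, theirs, "normal")
    else if sost = "ours" then (rezultat, ours ++ [stroka], theirs, sost)
    else if sost = "theirs" then (rezultat, ours, theirs ++ [stroka], sost)
    else (rezultat ++ [stroka], ours, theirs, sost)

def razobrat_konflikt (lines : List String) : List String :=
  (lines.foldl pvStepA ([], [], [], "normal")).1

-- ===== PORT B =====
def pvIsMarker (line : String) : Bool :=
  PySem.Str.startswith line pvKonfliktStart || PySem.Str.startswith line pvKonfliktDelim ||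
    PySem.Str.startswith line pvKonfliktEnd

-- the inner `while i < n and not _is_marker(lines[i])` loop of Source B: returns (collected, remaining)
def pvCollect : List String → List String → List String × List String
  | [], acc => (acc, [])
  | s :: rest, acc => if pvIsMarker s then (acc, s :: rest) else pvCollect rest (acc ++ [s])

-- termination fact for pvBLoop (the port cites it by name)
theorem pvCollect_snd_length : ∀ (l acc : List String), (pvCollect l acc).2.length ≤ l.length := by
  intro l
  induction l with
  | nil => intro acc; simp [pvCollect]
  | cons s r ih =>
    intro acc
    simp only [pvCollect]
    split
    · simp
    · exact le_trans (ih _) (Nat.le_succ _)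

def pvBLoop : List String → List String → List String → List String → List String
  | [], rezultat, _, _ => rezultat
  | line :: rest, rezultat, ours, theirs =>
    if PySem.Str.startswith line pvKonfliktStart then
      let c := pvCollect rest []
      pvBLoop c.2 rezultat c.1 []
    else if PySem.Str.startswith line pvKonfliktDelim then
      let c := pvCollect rest []
      pvBLoop c.2 rezultat ours (theirs ++ c.1)
    else if PySem.Str.startswith line pvKonfliktEnd then
      let r1 := rezultat ++ ours
      let r2 := if r1 ≠ [] ∧ r1.getLast? ≠ some "\n" then r1 ++ ["\n"] else r1
      pvBLoop rest (r2 ++ theirs) ours theirs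
    else
      pvBLoop rest (rezultat ++ [line]) ours theirs
termination_by l _ _ _ => l.length
decreasing_by
  · exact Nat.lt_succ_of_le (pvCollect_snd_length _ _)
  · exact Nat.lt_succ_of_le (pvCollect_snd_length _ _)
  · simp
  · simp

def razobrat_konflikt_alt (lines : List String) : List String :=
  pvBLoop lines [] [] []

-- ===== PRECONDITION & SPEC =====
def Spec_razobrat_konflikt (lines : List String) (out : List String) : Prop := out = razobrat_konflikt_alt lines
instance (lines : List String) (out : List String) : Decidable (Spec_razobrat_konflikt lines out) := by unfold Spec_razobrat_konflikt; infer_instance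

-- ===== CLAIM (what is proved, stated in full; the proofs are below) =====
def Claim_equal_razobrat_konflikt : Prop := ∀ (lines : List String), Dom_razobrat_konflikt lines → Spec_razobrat_konflikt lines (razobrat_konflikt lines)

-- ===== LEMMAS AND PROOFS =====

theorem pvCollect_eq : ∀ (l acc : List String),
    pvCollect l acc = (acc ++ l.takeWhile (fun t => !pvIsMarker t), l.dropWhile (fun t => !pvIsMarker t)) := by
  intro l
  induction l with
  | nil => intro acc; simp [pvCollect]
  | cons s r ih =>
    intro acc
    by_cases h : pvIsMarker s = true
    · simp [pvCollect, h]
    · simp only [Bool.not_eq_true] at h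
      simp [pvCollect, h, ih]

-- invariant: A's fold from any state equals B's scan, after B has absorbed the pending run
theorem pvMain : ∀ (n : Nat) (l : List String), l.length ≤ n →
    ∀ (rezultat ours theirs : List String) (sost : String),
    (List.foldl pvStepA (rezultat, ours, theirs, sost) l).1 =
      (if sost = "ours" then
        pvBLoop (l.dropWhile (fun t => !pvIsMarker t)) rezultat (ours ++ l.takeWhile (fun t => !pvIsMarker t)) theirs
      else if sost = "theirs" then
        pvBLoop (l.dropWhile (fun t => !pvIsMarker t)) rezultat ours (theirs ++ l.takeWhile (fun t => !pvIsMarker t))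
      else pvBLoop l rezultat ours theirs) := by
  intro n
  induction n with
  | zero =>
    intro l hlen rezultat ours theirs sost
    have : l = [] := List.eq_nil_of_length_eq_zero (Nat.le_zero.mp hlen)
    subst this
    split_ifs <;> simp [pvBLoop]
  | succ n ih =>
    intro l hlen rezultat ours theirs sost
    cases l with
    | nil => split_ifs <;> simp [pvBLoop]
    | cons s r =>
      have hr : r.length ≤ n := by simp at hlen; omega
      by_cases hS : PySem.Chars.startswith s.toList pvKonfliktStart.toList = true
      · have hm : pvIsMarker s = true := by simp [pvIsMarker, hS]
        have step : pvStepA (rezultat, ours, theirs, sost) s = (rezultat, [], [], "ours") := by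
          simp [pvStepA, hS]
        rw [List.foldl_cons, step, ih r hr]
        split_ifs <;> simp_all [pvBLoop, pvCollect_eq]
      · by_cases hD : PySem.Chars.startswith s.toList pvKonfliktDelim.toList = true
        · have hm : pvIsMarker s = true := by simp [pvIsMarker, hD]
          have step : pvStepA (rezultat, ours, theirs, sost) s = (rezultat, ours, theirs, "theirs") := by
            simp [pvStepA, hS, hD]
          rw [List.foldl_cons, step, ih r hr]
          split_ifs <;> simp_all [pvBLoop, pvCollect_eq]
        · by_cases hE : PySem.Chars.startswith s.toList pvKonfliktEnd.toList = true
          · have hm : pvIsMarker s = true := by simp [pvIsMarker, hE]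
            have step : pvStepA (rezultat, ours, theirs, sost) s =
                ((if rezultat ++ ours ≠ [] ∧ (rezultat ++ ours).getLast? ≠ some "\n" then
                    (rezultat ++ ours) ++ ["\n"] else rezultat ++ ours) ++ theirs,
                  ours, theirs, "normal") := by
              simp [pvStepA, hS, hD, hE]
            rw [List.foldl_cons, step, ih r hr]
            by_cases hO : sost = "ours"
            · simp [hO, hm, pvBLoop, hS, hD, hE]
            · by_cases hT : sost = "theirs"
              · simp [hT, hm, pvBLoop, hS, hD, hE]
              · simp [hO, hT, pvBLoop, hS, hD, hE]
          · have hm : pvIsMarker s = false := by simp [pvIsMarker, hS, hD, hE]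
            by_cases hO : sost = "ours"
            · have step : pvStepA (rezultat, ours, theirs, sost) s =
                  (rezultat, ours ++ [s], theirs, sost) := by
                simp [pvStepA, hS, hD, hE, hO]
              rw [List.foldl_cons, step, ih r hr]
              simp [hO, hm]
            · by_cases hT : sost = "theirs"
              · have step : pvStepA (rezultat, ours, theirs, sost) s =
                    (rezultat, ours, theirs ++ [s], sost) := by
                  simp [pvStepA, hS, hD, hE, hT]
                rw [List.foldl_cons, step, ih r hr]
                simp [hT, hm]
              · have step : pvStepA (rezultat, ours, theirs, sost) s =
                    (rezultat ++ [s], ours, theirs, sost) := by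
                  simp [pvStepA, hS, hD, hE, hO, hT]
                rw [List.foldl_cons, step, ih r hr]
                simp [hO, hT, pvBLoop, hS, hD, hE]

-- ===== VERDICT (by name: the statement is the Claim_ definition above) =====
theorem razobrat_konflikt_spec : Claim_equal_razobrat_konflikt := by
  intro lines _
  unfold Spec_razobrat_konflikt razobrat_konflikt razobrat_konflikt_alt
  rw [pvMain lines.length lines le_rfl]
  simp
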